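-- pv_equiv track=rewrite | github.com/lmfit/asteval | tests/scripts/func_kwargs.py | fcn
-- ===== SOURCE A (Python) =====
-- def fcn(square=False, x=0, y=0, z=0, t=0):
--     out = 0
--     for i in (x, y, z, t):
--         if square:
--             out = out + i * i
--         else:
--             out = out + i
--     return out
-- ===== SOURCE B (Python) =====
-- def fcn(square=False, x=0, y=0, z=0, t=0):
--     # Stage 1: transform the values up front (square them all if asked),
--     # Stage 2: sum by structural recursion on the sequence (no accumulator, no in-loop branch).
--     def total(vs):
--         if not vs:
--             return 0
--         return vs[0] + total(vs[1:])
--     vals = (x, y, z, t)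
--     if square:
--         vals = tuple(v * v for v in vals)
--     return total(vals)
-- ===== Notes on version B (the rewrite author's own statement) =====
-- stated objective: alternative
-- what changed: Replaces A's single iterative accumulator loop with a per-element square test by a two-stage decomposition: one map pass that squares all values up front when the flag is set, followed by a recursive right-fold sum with no accumulator and no branch per element.
import Mathlib
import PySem

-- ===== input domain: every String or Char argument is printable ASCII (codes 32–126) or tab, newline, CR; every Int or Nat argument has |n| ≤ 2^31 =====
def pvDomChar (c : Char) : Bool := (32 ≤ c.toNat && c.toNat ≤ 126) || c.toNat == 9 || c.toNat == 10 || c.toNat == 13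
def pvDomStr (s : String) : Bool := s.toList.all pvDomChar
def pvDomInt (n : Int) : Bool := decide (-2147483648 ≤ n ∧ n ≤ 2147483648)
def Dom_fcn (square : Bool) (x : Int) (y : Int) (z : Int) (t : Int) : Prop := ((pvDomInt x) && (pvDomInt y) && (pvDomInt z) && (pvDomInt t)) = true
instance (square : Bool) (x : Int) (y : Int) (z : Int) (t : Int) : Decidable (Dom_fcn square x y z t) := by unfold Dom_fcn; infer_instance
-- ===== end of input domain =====

-- ===== PORT A =====
-- A: single loop over (x,y,z,t) with a running accumulator, testing `square` each step.
def fcn (square : Bool) (x : Int) (y : Int) (z : Int) (t : Int) : Int :=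
  [x, y, z, t].foldl (fun out i => if square then out + i * i else out + i) 0

-- ===== PORT B =====
-- B: two stages — map pass squaring all values when the flag is set, then a recursive sum (no accumulator, no per-element branch).
def fcnAltTotal : List Int → Int
  | [] => 0
  | v :: rest => v + fcnAltTotal rest

def fcn_alt (square : Bool) (x : Int) (y : Int) (z : Int) (t : Int) : Int :=
  let vals := [x, y, z, t]
  let vals := if square then vals.map (fun v => v * v) else vals
  fcnAltTotal vals

-- ===== PRECONDITION & SPEC =====
def Spec_fcn (square : Bool) (x : Int) (y : Int) (z : Int) (t : Int) (out : Int) : Prop := out = fcn_alt square x y z t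
instance (square : Bool) (x : Int) (y : Int) (z : Int) (t : Int) (out : Int) : Decidable (Spec_fcn square x y z t out) := by unfold Spec_fcn; infer_instance

-- ===== CLAIM (what is proved, stated in full; the proofs are below) =====
def Claim_equal_fcn : Prop := ∀ (square : Bool) (x : Int) (y : Int) (z : Int) (t : Int), Dom_fcn square x y z t → Spec_fcn square x y z t (fcn square x y z t)

-- ===== LEMMAS AND PROOFS =====

-- ===== VERDICT =====
theorem fcn_spec : Claim_equal_fcn := by
  intro square x y z t _
  unfold Spec_fcn fcn fcn_alt
  cases square <;> simp [List.foldl, fcnAltTotal, List.map] <;> ring
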